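-- pv_equiv track=rewrite | github.com/MrBrantCode/unitest_baseline | mut_generate/mist_train_cf/cf_26146/solution.py | find_shortest_substring
-- ===== SOURCE A (Python) =====
-- def find_shortest_substring(words, string):
--     """
--     Given an array containing words and a string, find the shortest word in the array that is a substring of the string.
--
--     Parameters:
--     words (list): A list of words.
--     string (str): The string to check for substrings.
--
--     Returns:
--     str: The shortest word in the list that is a substring of the string.
--     """
--     min_length = float("inf")
--     min_word = None
--     for word in words:
--         j = string.find(word)
--         if j > -1 and len(word) < min_length:
--             min_length = len(word)
--             min_word = word
--     return min_word
-- ===== SOURCE B (Python) =====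
-- def find_shortest_substring(words, string):
--     """Shortest word in `words` that is a substring of `string` (first on ties)."""
--     for word in sorted(words, key=len):
--         if word in string:
--             return word
--     return None
-- ===== Notes on version B (the rewrite author's own statement) =====
-- stated objective: faster
-- what changed: A's full scan tracking the current minimum length is replaced by a stable length-ascending sort followed by a short-circuiting scan that returns the first word occurring in the string, so substring search stops at the first (shortest) match instead of running on every word.
import Mathlib
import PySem

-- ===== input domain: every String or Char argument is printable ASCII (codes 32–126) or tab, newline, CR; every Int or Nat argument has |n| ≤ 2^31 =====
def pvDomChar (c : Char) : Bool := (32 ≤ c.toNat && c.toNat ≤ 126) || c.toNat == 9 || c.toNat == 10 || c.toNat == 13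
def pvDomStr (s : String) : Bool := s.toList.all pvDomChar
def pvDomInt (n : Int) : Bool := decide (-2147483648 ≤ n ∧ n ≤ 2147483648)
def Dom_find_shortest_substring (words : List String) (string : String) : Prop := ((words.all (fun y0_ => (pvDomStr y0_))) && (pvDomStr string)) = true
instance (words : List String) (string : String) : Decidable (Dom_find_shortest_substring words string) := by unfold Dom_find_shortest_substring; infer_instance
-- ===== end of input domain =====

-- B replaces A's min-length-tracking scan by a stable sort-by-length followed by a first-match scan (alternative decomposition, same asymptotic substring work).


-- ===== PORT A =====
-- min_length = float("inf") is modelled as `none : Option Int`; state is (min_length, min_word).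
def find_shortest_substring (words : List String) (string : String) : Option String :=
  (words.foldl
    (fun (st : Option Int × Option String) word =>
      let j := PySem.Str.find string word
      if decide (j > -1) &&
         (match st.1 with
          | none => true                                   -- len(word) < inf
          | some m => decide (PySem.Str.len word < m)) then
        (some (PySem.Str.len word), some word)
      else st)
    (none, none)).2

-- ===== PORT B =====
def find_shortest_substring_alt (words : List String) (string : String) : Option String :=
  (PySem.List.sorted words (fun w => PySem.Str.len w) false).find?
    (fun word => PySem.Str.isIn word string)

-- ===== PRECONDITION & SPEC =====
def Spec_find_shortest_substring (words : List String) (string : String) (out : Option String) : Prop := out = find_shortest_substring_alt words string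
instance (words : List String) (string : String) (out : Option String) : Decidable (Spec_find_shortest_substring words string out) := by unfold Spec_find_shortest_substring; infer_instance

-- ===== CLAIM (what is proved, stated in full; the proofs are below) =====
def Claim_equal_find_shortest_substring : Prop := ∀ (words : List String) (string : String), Dom_find_shortest_substring words string → Spec_find_shortest_substring words string (find_shortest_substring words string)

-- ===== LEMMAS AND PROOFS =====

-- the shared match predicate and the "first strictly-shorter match wins" accumulator step
def pvP (string w : String) : Bool := PySem.Str.isIn w string

def pvAStep (string : String) (st : Option Int × Option String) (word : String) :
    Option Int × Option String :=
  if pvP string word &&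
     (match st.1 with
      | none => true
      | some m => decide (PySem.Str.len word < m)) then
    (some (PySem.Str.len word), some word)
  else st

def pvStep (string : String) (acc : Option String) (w : String) : Option String :=
  if pvP string w &&
     (match acc with
      | none => true
      | some m => decide (PySem.Str.len w < PySem.Str.len m)) then some w else acc

def pvFM (string : String) (xs : List String) (acc : Option String) : Option String :=
  xs.foldl (pvStep string) acc

-- A's test `string.find(word) > -1` is exactly `word in string`
lemma pvCond_eq (string w : String) :
    (decide (PySem.Str.find string w > -1)) = pvP string w := by
  rw [pvP, Bool.eq_iff_iff, decide_eq_true_eq,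
    show (PySem.Str.find string w > -1 ↔ 0 ≤ PySem.Str.find string w) from by omega,
    PySem.Str.find_nonneg_iff, PySem.Str.isIn_iff_infix]

-- A's step function is pvAStep
lemma pvAStep_eq (string : String) :
    (fun (st : Option Int × Option String) word =>
      let j := PySem.Str.find string word
      if decide (j > -1) &&
         (match st.1 with
          | none => true
          | some m => decide (PySem.Str.len word < m)) then
        (some (PySem.Str.len word), some word)
      else st) = pvAStep string := by
  funext st word
  show (if (decide (PySem.Str.find string word > -1) &&
         (match st.1 with
          | none => true
          | some m => decide (PySem.Str.len word < m))) = true then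
        (some (PySem.Str.len word), some word)
      else st) = pvAStep string st word
  rw [pvCond_eq]
  rfl

-- A's fold, under the invariant min_length = len <$> min_word, is the pvStep fold
lemma pvA_eq (string : String) (xs : List String) (mw : Option String) :
    (xs.foldl (pvAStep string) (mw.map PySem.Str.len, mw)).2 = pvFM string xs mw := by
  induction xs generalizing mw with
  | nil => simp [pvFM]
  | cons w ws ih =>
    rw [pvFM, List.foldl_cons, List.foldl_cons, ← pvFM]
    rcases mw with _ | m
    · simp only [pvAStep, pvStep, Option.map_none]
      cases hw : pvP string w with
      | false => rw [if_neg (by simp), if_neg (by simp)]; exact ih none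
      | true => rw [if_pos (by simp), if_pos (by simp)]; exact ih (some w)
    · simp only [pvAStep, pvStep, Option.map_some]
      cases hc : (pvP string w && decide (PySem.Str.len w < PySem.Str.len m)) with
      | false => rw [if_neg (by simp), if_neg (by simp)]; exact ih (some m)
      | true => rw [if_pos rfl, if_pos rfl]; exact ih (some w)

-- the first match of a length-sorted list is no shorter than the head
lemma pvFind_le (string y m : String) (ys : List String)
    (hL : (y :: ys).Pairwise (fun a b => PySem.Str.len a ≤ PySem.Str.len b))
    (hm : (y :: ys).find? (pvP string) = some m) :
    PySem.Str.len y ≤ PySem.Str.len m := by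
  rcases List.mem_cons.mp (List.mem_of_find?_eq_some hm) with h | h
  · exact le_of_eq (by rw [h])
  · exact (List.pairwise_cons.mp hL).1 m h

-- inserting x into a length-sorted list commutes with "first match" via pvStep
lemma pvFind_insertBy (string x : String) (L : List String)
    (hL : L.Pairwise (fun a b => PySem.Str.len a ≤ PySem.Str.len b)) :
    (PySem.List.insertBy (fun a b => decide (PySem.Str.len a < PySem.Str.len b)) x L).find?
        (pvP string)
      = pvStep string (L.find? (pvP string)) x := by
  induction L with
  | nil =>
    rw [show PySem.List.insertBy (fun a b => decide (PySem.Str.len a < PySem.Str.len b)) x []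
        = [x] from rfl, List.find?_nil]
    simp only [pvStep]
    cases hx : pvP string x with
    | false => rw [if_neg (by simp), List.find?_cons_of_neg (by simp [hx]), List.find?_nil]
    | true => rw [if_pos (by simp), List.find?_cons_of_pos hx]
  | cons y ys ih =>
    rw [show PySem.List.insertBy (fun a b => decide (PySem.Str.len a < PySem.Str.len b)) x (y :: ys)
        = if decide (PySem.Str.len x < PySem.Str.len y) = true then x :: y :: ys
          else y :: PySem.List.insertBy (fun a b => decide (PySem.Str.len a < PySem.Str.len b)) x ys
        from rfl]
    by_cases hlt : PySem.Str.len x < PySem.Str.len y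
    · rw [decide_eq_true hlt, if_pos rfl]
      cases hx : pvP string x with
      | false =>
        rw [List.find?_cons_of_neg (by simp [hx])]
        simp only [pvStep]
        rw [if_neg (by simp [hx])]
      | true =>
        rw [List.find?_cons_of_pos hx]
        cases hfind : (y :: ys).find? (pvP string) with
        | none =>
          simp only [pvStep]
          rw [if_pos (by simp [hx])]
        | some m =>
          have hxm : PySem.Str.len x < PySem.Str.len m :=
            lt_of_lt_of_le hlt (pvFind_le string y m ys hL hfind)
          simp only [pvStep]
          rw [if_pos (by simp [hx]; simpa using hxm)]
    · rw [decide_eq_false hlt, if_neg (by simp)]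
      cases hy : pvP string y with
      | false =>
        rw [List.find?_cons_of_neg (by simp [hy]), List.find?_cons_of_neg (by simp [hy]),
          ih (List.pairwise_cons.mp hL).2]
      | true =>
        rw [List.find?_cons_of_pos hy, List.find?_cons_of_pos hy]
        simp only [pvStep]
        rw [if_neg (by rw [decide_eq_false hlt, Bool.and_false]; simp)]

-- B's sorted-then-scan equals the pvStep fold, by reverse induction on the word list
lemma pvB_eq (string : String) (xs : List String) :
    (PySem.List.sorted xs (fun w => PySem.Str.len w) false).find? (pvP string)
      = pvFM string xs none := by
  induction xs using List.reverseRecOn with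
  | nil => simp [PySem.List.sorted_eq_foldl_insertBy, pvFM]
  | append_singleton ys x ih =>
    have hs : PySem.List.sorted (ys ++ [x]) (fun w => PySem.Str.len w) false
        = PySem.List.insertBy (fun a b => decide (PySem.Str.len a < PySem.Str.len b)) x
            (PySem.List.sorted ys (fun w => PySem.Str.len w) false) := by
      rw [PySem.List.sorted_eq_foldl_insertBy, PySem.List.sorted_eq_foldl_insertBy,
        List.foldl_append]
      rfl
    rw [hs, pvFind_insertBy string x _ (PySem.List.sorted_pairwise ys _), ih, pvFM, pvFM,
      List.foldl_append, List.foldl_cons, List.foldl_nil]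

-- ===== VERDICT (by name: the statement is the Claim_ definition above) =====
theorem find_shortest_substring_spec : Claim_equal_find_shortest_substring := by
  intro words string _
  unfold Spec_find_shortest_substring find_shortest_substring find_shortest_substring_alt
  rw [show (fun word => PySem.Str.isIn word string) = pvP string from rfl, pvB_eq, pvAStep_eq]
  exact pvA_eq string words none
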